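-- pv_equiv track=rewrite | github.com/rbonvall/carioca | carioca.py | is_card_subset
-- ===== SOURCE A (Python) =====
-- from collections import namedtuple, defaultdict
--
-- def is_card_subset(subset, superset):
--     '''Check whether all cards in subset are in superset'''
--
--     # in python 2.7 and 3.1, this will be simply:
--     # subset_counter   = collections.Counter(subset_counter)
--     # superset_counter = collections.Counter(superset_counter)
--
--     subset_counter = defaultdict(int)
--     for card in subset:
--         subset_counter[card] += 1
--
--     superset_counter = defaultdict(int)
--     for card in superset:
--         superset_counter[card] += 1
--
--     return all(subset_counter[card] <= superset_counter[card]
--                for card in subset_counter)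
-- ===== SOURCE B (Python) =====
-- from collections import defaultdict
--
-- def is_card_subset(subset, superset):
--     '''Check whether all cards in subset are in superset'''
--     remaining = defaultdict(int)
--     for card in superset:
--         remaining[card] += 1
--     for card in subset:
--         remaining[card] -= 1
--         if remaining[card] < 0:
--             return False
--     return True
-- ===== Notes on version B (the rewrite author's own statement) =====
-- stated objective: simpler
-- what changed: B builds only a superset counter and makes one pass over subset decrementing a remaining-capacity budget, returning False at the first card that overdraws, instead of building two full count tables and comparing them key by key.
import Mathlib
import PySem

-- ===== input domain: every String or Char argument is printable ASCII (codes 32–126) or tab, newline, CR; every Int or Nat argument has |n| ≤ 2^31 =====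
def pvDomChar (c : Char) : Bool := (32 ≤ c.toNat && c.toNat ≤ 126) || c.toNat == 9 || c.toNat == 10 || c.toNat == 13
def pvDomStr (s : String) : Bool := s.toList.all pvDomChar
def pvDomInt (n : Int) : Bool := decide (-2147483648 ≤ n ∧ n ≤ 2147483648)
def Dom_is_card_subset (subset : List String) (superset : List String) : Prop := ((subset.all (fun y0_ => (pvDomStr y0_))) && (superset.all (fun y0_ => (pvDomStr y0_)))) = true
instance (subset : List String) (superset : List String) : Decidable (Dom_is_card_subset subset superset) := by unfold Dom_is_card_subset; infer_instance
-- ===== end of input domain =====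

-- B builds only the superset counter and threads a remaining-capacity budget through one pass over subset
-- with an early False; A builds both count tables and compares them key by key.

-- ===== PORT A =====
def is_card_subset (subset : List String) (superset : List String) : Bool :=
  let subset_counter := subset.foldl (fun d card => d.modify card 0 (· + 1)) (PySem.Dict.empty : PySem.Dict String Int)
  let superset_counter := superset.foldl (fun d card => d.modify card 0 (· + 1)) (PySem.Dict.empty : PySem.Dict String Int)
  subset_counter.keys.all (fun card => subset_counter.getD card 0 ≤ superset_counter.getD card 0)

-- ===== PORT B =====
-- the 'for card in subset' loop with its early return
def altGo : List String → PySem.Dict String Int → Bool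
  | [], _ => true
  | card :: rest, remaining =>
    let remaining := remaining.modify card 0 (· - 1)
    if remaining.getD card 0 < 0 then false else altGo rest remaining

def is_card_subset_alt (subset : List String) (superset : List String) : Bool :=
  let remaining := superset.foldl (fun d card => d.modify card 0 (· + 1)) (PySem.Dict.empty : PySem.Dict String Int)
  altGo subset remaining

-- ===== PRECONDITION & SPEC =====
def Spec_is_card_subset (subset : List String) (superset : List String) (out : Bool) : Prop := out = is_card_subset_alt subset superset
instance (subset : List String) (superset : List String) (out : Bool) : Decidable (Spec_is_card_subset subset superset out) := by unfold Spec_is_card_subset; infer_instance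

-- ===== CLAIM (what is proved, stated in full; the proofs are below) =====
def Claim_equal_is_card_subset : Prop := ∀ (subset : List String) (superset : List String), Dom_is_card_subset subset superset → Spec_is_card_subset subset superset (is_card_subset subset superset)

-- ===== LEMMAS AND PROOFS =====

-- B's loop succeeds iff every card of the list fits within the budget dictionary
theorem altGo_eq (cs : List String) : ∀ (d : PySem.Dict String Int),
    altGo cs d = decide (∀ x ∈ cs, (cs.count x : Int) ≤ d.getD x 0) := by
  induction cs with
  | nil => intro d; simp [altGo]
  | cons c cs ih =>
    intro d
    simp only [altGo, PySem.Dict.getD_modify_self]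
    by_cases h : d.getD c 0 - 1 < 0
    · rw [if_pos h]
      symm
      simp only [decide_eq_false_iff_not, not_forall]
      refine ⟨c, by simp, ?_⟩
      have hcnt : List.count c (c :: cs) = List.count c cs + 1 := List.count_cons_self
      omega
    · rw [if_neg h, ih]
      congr 1
      apply propext
      constructor
      · intro H x hx
        rcases List.mem_cons.mp hx with rfl | hx'
        · have hcnt : List.count x (x :: cs) = List.count x cs + 1 := List.count_cons_self
          by_cases hc : x ∈ cs
          · have := H x hc
            rw [PySem.Dict.getD_modify, if_pos rfl] at this
            omega
          · have hz : cs.count x = 0 := List.count_eq_zero.mpr hc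
            omega
        · by_cases he : x = c
          · subst he
            have hcnt : List.count x (x :: cs) = List.count x cs + 1 := List.count_cons_self
            have := H x hx'
            rw [PySem.Dict.getD_modify, if_pos rfl] at this
            omega
          · have := H x hx'
            rw [PySem.Dict.getD_modify, if_neg he] at this
            have hcnt : (c :: cs).count x = cs.count x := by simp [List.count_cons]; exact fun hh => he hh.symm
            omega
      · intro H x hx
        rw [PySem.Dict.getD_modify]
        by_cases he : x = c
        · subst he
          have := H x List.mem_cons_self
          have hcnt : List.count x (x :: cs) = List.count x cs + 1 := List.count_cons_self
          rw [if_pos rfl]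
          omega
        · have := H x (List.mem_cons_of_mem c hx)
          have hcnt : (c :: cs).count x = cs.count x := by simp [List.count_cons]; exact fun hh => he hh.symm
          rw [if_neg he]
          omega

-- ===== VERDICT (by name: the statement is the Claim_ definition above) =====
theorem is_card_subset_spec : Claim_equal_is_card_subset := by
  intro subset superset _
  unfold Spec_is_card_subset is_card_subset is_card_subset_alt
  rw [altGo_eq]
  rw [show (subset.foldl (fun d card => d.modify card 0 (· + 1)) (PySem.Dict.empty : PySem.Dict String Int)) = PySem.Dict.counter subset from (PySem.Dict.counter_eq_foldl subset).symm,
      show (superset.foldl (fun d card => d.modify card 0 (· + 1)) (PySem.Dict.empty : PySem.Dict String Int)) = PySem.Dict.counter superset from (PySem.Dict.counter_eq_foldl superset).symm]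
  simp only [PySem.Dict.keys_counter, PySem.Dict.getD_counter]
  rcases h : decide (∀ x ∈ subset, (List.count x subset : Int) ≤ (List.count x superset : Int)) with _ | _
  · rw [decide_eq_false_iff_not] at h
    rw [List.all_eq_false]
    push Not at h
    obtain ⟨x, hx, hle⟩ := h
    exact ⟨x, by simp [PySem.Set.mem_ofList, hx], by simpa using hle⟩
  · rw [decide_eq_true_eq] at h
    rw [List.all_eq_true]
    intro x hx
    exact decide_eq_true (h x (by simpa [PySem.Set.mem_ofList] using hx))
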